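-- pv_equiv track=rewrite | github.com/pypi-data/pypi-mirror-402 | packages/cihub/cihub-1.0.16-py3-none-any.whl/cihub/services/ai/patterns.py | suggest_from_problems
-- ===== SOURCE A (Python) =====
-- from typing import Any
--
-- _PROBLEM_HINTS: dict[str, tuple[str, str]] = {
--     "CIHUB-CI-DEPS": (
--         "CIHUB-AI-CI-DEPS",
--         "Dependency install failed; rerun with `cihub ci --install-deps` or update dependency commands.",
--     ),
--     "CIHUB-CI-MISSING-TOOL": (
--         "CIHUB-AI-CI-MISSING-TOOL",
--         "Install the missing tool or disable it in `.ci-hub.yml`.",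
--     ),
--     "CIHUB-CI-UNSUPPORTED": (
--         "CIHUB-AI-CI-UNSUPPORTED",
--         "Tool is unsupported by cihub; run it via a workflow step or remove it from config.",
--     ),
--     "CIHUB-CI-LANGUAGE": (
--         "CIHUB-AI-CI-LANGUAGE",
--         "Run `cihub detect` or set the repo language in `.ci-hub.yml`.",
--     ),
-- }
--
-- def _add_suggestion(
--     suggestions: list[dict[str, Any]],
--     seen: set[tuple[str, str]],
--     code: str,
--     message: str,
-- ) -> None:
--     key = (code, message)
--     if key in seen:
--         return
--     seen.add(key)
--     suggestions.append({"message": message, "code": code})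
--
-- def suggest_from_problems(problems: list[dict[str, Any]]) -> list[dict[str, Any]]:
--     suggestions: list[dict[str, Any]] = []
--     seen: set[tuple[str, str]] = set()
--
--     for problem in problems:
--         code = str(problem.get("code", "")).upper()
--         hint = _PROBLEM_HINTS.get(code)
--         if hint:
--             _add_suggestion(suggestions, seen, hint[0], hint[1])
--
--     return suggestions
-- ===== SOURCE B (Python) =====
-- from typing import Any
--
-- _PROBLEM_HINTS: dict[str, tuple[str, str]] = {
--     "CIHUB-CI-DEPS": (
--         "CIHUB-AI-CI-DEPS",
--         "Dependency install failed; rerun with `cihub ci --install-deps` or update dependency commands.",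
--     ),
--     "CIHUB-CI-MISSING-TOOL": (
--         "CIHUB-AI-CI-MISSING-TOOL",
--         "Install the missing tool or disable it in `.ci-hub.yml`.",
--     ),
--     "CIHUB-CI-UNSUPPORTED": (
--         "CIHUB-AI-CI-UNSUPPORTED",
--         "Tool is unsupported by cihub; run it via a workflow step or remove it from config.",
--     ),
--     "CIHUB-CI-LANGUAGE": (
--         "CIHUB-AI-CI-LANGUAGE",
--         "Run `cihub detect` or set the repo language in `.ci-hub.yml`.",
--     ),
-- }
--
-- def suggest_from_problems(problems: list[dict[str, Any]]) -> list[dict[str, Any]]: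
--     # Stage 1: resolve every problem's code to its hint pair, dropping unknown codes.
--     pairs = [
--         _PROBLEM_HINTS[code]
--         for code in (str(p.get("code", "")).upper() for p in problems)
--         if code in _PROBLEM_HINTS
--     ]
--     # Stage 2: keep a pair only if it does not occur in its own prefix (brute-force
--     # first-occurrence dedup by rescanning, no auxiliary seen structure).
--     firsts = [pair for i, pair in enumerate(pairs) if pair not in pairs[:i]]
--     # Stage 3: project to the output dict shape.
--     return [{"message": m, "code": c} for (c, m) in firsts]
-- ===== Notes on version B (the rewrite author's own statement) =====
-- stated objective: alternative
-- what changed: Replaces A's fused single pass that mutates a seen-set via the _add_suggestion helper with a stateless staged pipeline whose dedup keeps a pair only if it is absent from its own prefix (pair not in pairs[:i] brute-force rescan), eliminating the seen set and the helper entirely.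
import Mathlib
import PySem

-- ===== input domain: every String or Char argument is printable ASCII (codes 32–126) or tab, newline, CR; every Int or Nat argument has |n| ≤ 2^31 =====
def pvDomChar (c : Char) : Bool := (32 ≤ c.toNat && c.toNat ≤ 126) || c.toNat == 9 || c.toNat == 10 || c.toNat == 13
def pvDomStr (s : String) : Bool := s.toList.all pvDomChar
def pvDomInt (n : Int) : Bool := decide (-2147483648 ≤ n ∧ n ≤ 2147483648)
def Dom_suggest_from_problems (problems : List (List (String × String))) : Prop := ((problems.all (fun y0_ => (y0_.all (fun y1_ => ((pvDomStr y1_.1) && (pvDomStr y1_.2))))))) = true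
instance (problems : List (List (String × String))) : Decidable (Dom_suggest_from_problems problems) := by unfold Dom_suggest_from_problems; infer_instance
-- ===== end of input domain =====

-- B replaces A's fused seen-set pass by a stateless staged pipeline whose dedup rescans each pair's own prefix (alternative decomposition; not faster).

-- the module constant _PROBLEM_HINTS (shared same-module context of both programs)
def pvHints : PySem.Dict String (String × String) := PySem.Dict.ofList [
  ("CIHUB-CI-DEPS", ("CIHUB-AI-CI-DEPS",
    "Dependency install failed; rerun with `cihub ci --install-deps` or update dependency commands.")),
  ("CIHUB-CI-MISSING-TOOL", ("CIHUB-AI-CI-MISSING-TOOL",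
    "Install the missing tool or disable it in `.ci-hub.yml`.")),
  ("CIHUB-CI-UNSUPPORTED", ("CIHUB-AI-CI-UNSUPPORTED",
    "Tool is unsupported by cihub; run it via a workflow step or remove it from config.")),
  ("CIHUB-CI-LANGUAGE", ("CIHUB-AI-CI-LANGUAGE",
    "Run `cihub detect` or set the repo language in `.ci-hub.yml`."))]

-- ===== PORT A =====
-- helper _add_suggestion: mutates (suggestions, seen); ported as a state-to-state function
def pvAddSuggestion (suggestions : List (List (String × String)))
    (seen : PySem.Set (String × String)) (code message : String) :
    List (List (String × String)) × PySem.Set (String × String) :=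
  let key := (code, message)
  if PySem.Set.contains seen key then (suggestions, seen)
  else (suggestions ++ [[("message", message), ("code", code)]], PySem.Set.add seen key)

def suggest_from_problems (problems : List (List (String × String))) : List (List (String × String)) :=
  (problems.foldl
    (fun (st : List (List (String × String)) × PySem.Set (String × String)) problem =>
      let code := PySem.Str.upper (PySem.Dict.getD ⟨problem⟩ "code" "")
      match pvHints.get? code with
      | some hint => pvAddSuggestion st.1 st.2 hint.1 hint.2
      | none => st)
    ([], PySem.Set.empty)).1

-- ===== PORT B =====
def suggest_from_problems_alt (problems : List (List (String × String))) : List (List (String × String)) :=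
  -- stage 1: resolve codes to hint pairs
  let pairs := problems.filterMap
    (fun p => pvHints.get? (PySem.Str.upper (PySem.Dict.getD ⟨p⟩ "code" "")))
  -- stage 2: keep a pair iff it is absent from its own prefix (pair not in pairs[:i])
  let firsts := ((PySem.List.enumerate pairs).filter
    (fun ip => !(PySem.List.slice pairs none (some ip.1)).contains ip.2)).map (·.2)
  -- stage 3: project to the output dicts
  firsts.map (fun cm => [("message", cm.2), ("code", cm.1)])

-- ===== PRECONDITION & SPEC =====
def Spec_suggest_from_problems (problems : List (List (String × String))) (out : List (List (String × String))) : Prop := out = suggest_from_problems_alt problems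
instance (problems : List (List (String × String))) (out : List (List (String × String))) : Decidable (Spec_suggest_from_problems problems out) := by unfold Spec_suggest_from_problems; infer_instance

-- ===== CLAIM (what is proved, stated in full; the proofs are below) =====
def Claim_equal_suggest_from_problems : Prop := ∀ (problems : List (List (String × String))), Dom_suggest_from_problems problems → Spec_suggest_from_problems problems (suggest_from_problems problems)

-- ===== LEMMAS AND PROOFS =====

-- A's loop over problems, restricted to the pairs the hint lookup yields
theorem pvFold_filterMap (problems : List (List (String × String)))
    (st : List (List (String × String)) × PySem.Set (String × String)) :
    problems.foldl
      (fun (st : List (List (String × String)) × PySem.Set (String × String)) problem =>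
        let code := PySem.Str.upper (PySem.Dict.getD ⟨problem⟩ "code" "")
        match pvHints.get? code with
        | some hint => pvAddSuggestion st.1 st.2 hint.1 hint.2
        | none => st) st
    = (problems.filterMap
        (fun p => pvHints.get? (PySem.Str.upper (PySem.Dict.getD ⟨p⟩ "code" "")))).foldl
        (fun st hint => pvAddSuggestion st.1 st.2 hint.1 hint.2) st := by
  induction problems generalizing st with
  | nil => rfl
  | cons p ps ih =>
    simp only [List.foldl_cons, List.filterMap_cons]
    cases h : pvHints.get? (PySem.Str.upper (PySem.Dict.getD ⟨p⟩ "code" "")) with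
    | none => simpa [h] using ih st
    | some hint => simpa [h] using ih _

-- invariant of A's loop: the suggestion list is the projection of the seen set (in insertion order)
theorem pvFold_add (pairs : List (String × String)) (seen : PySem.Set (String × String)) :
    (pairs.foldl (fun st hint => pvAddSuggestion st.1 st.2 hint.1 hint.2)
      (seen.map (fun cm => [("message", cm.2), ("code", cm.1)]), seen)).1
    = (pairs.foldl PySem.Set.add seen).map (fun cm => [("message", cm.2), ("code", cm.1)]) := by
  induction pairs generalizing seen with
  | nil => rfl
  | cons p ps ih =>
    have hstep : pvAddSuggestion (seen.map (fun cm => [("message", cm.2), ("code", cm.1)])) seen p.1 p.2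
        = ((PySem.Set.add seen p).map (fun cm => [("message", cm.2), ("code", cm.1)]), PySem.Set.add seen p) := by
      simp only [pvAddSuggestion, PySem.Set.add]
      by_cases h : p ∈ seen
      · simp [h]
      · simp [h]
    simp only [List.foldl_cons]
    rw [hstep]
    exact ih (PySem.Set.add seen p)

-- B's prefix-rescan filter, characterised against the seen-set fold: processing a suffix `suf`
-- of `full = b ++ suf` with accumulated set `s` (same members as the prefix `b`) appends exactly
-- the suffix elements absent from their own prefix of `full`.
theorem pvPrefixFilter (full : List (String × String)) :
    ∀ (suf b s : List (String × String)), full = b ++ suf → (∀ x, x ∈ s ↔ x ∈ b) →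
    suf.foldl PySem.Set.add s
    = s ++ (((PySem.List.enumerate suf (b.length : Int)).filter
        (fun ip => !(PySem.List.slice full none (some ip.1)).contains ip.2)).map (·.2)) := by
  intro suf
  induction suf with
  | nil => intro b s _ _; simp [PySem.List.enumerate]
  | cons a suf ih =>
    intro b s hfull hmem
    have hslice : PySem.List.slice full none (some (b.length : Int)) = b := by
      rw [PySem.List.slice_to_natCast, hfull, List.take_left']
      rfl
    have hcond : (!(PySem.List.slice full none (some (b.length : Int))).contains a)
        = !(decide (a ∈ s)) := by
      rw [hslice]
      by_cases h : a ∈ b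
      · simp [h, (hmem a).mpr h]
      · have hns : a ∉ s := fun hs => h ((hmem a).mp hs)
        simp [h, hns]
    have hlen : (((b ++ [a]).length : Nat) : Int) = (b.length : Int) + 1 := by
      simp
    have hfull' : full = (b ++ [a]) ++ suf := by simpa using hfull
    rw [PySem.List.enumerate_cons, List.filter_cons, List.foldl_cons]
    simp only [hcond]
    by_cases hs : a ∈ s
    · have hset : PySem.Set.add s a = s := by simp [PySem.Set.add, hs]
      rw [hset, ih (b ++ [a]) s hfull'
        (fun x => by
          constructor
          · intro hx; exact List.mem_append_left _ ((hmem x).mp hx)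
          · intro hx
            rcases List.mem_append.mp hx with h | h
            · exact (hmem x).mpr h
            · simp at h; subst h; exact hs), hlen]
      simp [hs]
    · have hset : PySem.Set.add s a = s ++ [a] := by simp [PySem.Set.add, hs]
      rw [hset, ih (b ++ [a]) (s ++ [a]) hfull'
        (fun x => by
          simp only [List.mem_append, List.mem_singleton]
          exact or_congr_left (hmem x)), hlen]
      simp [hs]

theorem suggest_from_problems_spec : Claim_equal_suggest_from_problems := by
  intro problems _
  unfold Spec_suggest_from_problems
  simp only [suggest_from_problems, suggest_from_problems_alt]
  rw [pvFold_filterMap]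
  have hA := pvFold_add
    (problems.filterMap (fun p => pvHints.get? (PySem.Str.upper (PySem.Dict.getD ⟨p⟩ "code" ""))))
    PySem.Set.empty
  have hB := pvPrefixFilter
    (problems.filterMap (fun p => pvHints.get? (PySem.Str.upper (PySem.Dict.getD ⟨p⟩ "code" ""))))
    (problems.filterMap (fun p => pvHints.get? (PySem.Str.upper (PySem.Dict.getD ⟨p⟩ "code" ""))))
    [] [] rfl (fun x => Iff.rfl)
  simp only [PySem.Set.empty, List.map_nil] at hA ⊢
  rw [hA]
  simp only [List.length_nil, Nat.cast_zero, List.nil_append] at hB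
  rw [hB]
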